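-- pv_equiv track=rewrite | github.com/zplchn/m_amzn | two_sigma.py | missing_words
-- ===== SOURCE A (Python) =====
-- def missing_words(s: str, t: str) -> str:
--     sa, ta = s.split(), t.split()
--     res = []
--     i = j = 0
--     while i < len(sa):
--         if j == len(ta) or sa[i] != ta[j]:
--             res.append(sa[i])
--             i += 1
--         else:
--             i, j = i + 1, j + 1
--     return ' '.join(res)
-- ===== SOURCE B (Python) =====
-- def missing_words(s: str, t: str) -> str:
--     sa, ta = s.split(), t.split()
--     matched = set()
--     prev = -1
--     for w in ta:
--         try:
--             prev = sa.index(w, prev + 1)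
--         except ValueError:
--             break
--         matched.add(prev)
--     return ' '.join(w for i, w in enumerate(sa) if i not in matched)
-- ===== Notes on version B (the rewrite author's own statement) =====
-- stated objective: alternative
-- what changed: Instead of A's streaming two-pointer scan that emits unmatched words on the fly, B first computes the set of greedily matched s-indices by repeated sa.index(w, prev+1) searches over the tokens of t (breaking on the first failed search), then in a second pass filters s's tokens by that index set.
import Mathlib
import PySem

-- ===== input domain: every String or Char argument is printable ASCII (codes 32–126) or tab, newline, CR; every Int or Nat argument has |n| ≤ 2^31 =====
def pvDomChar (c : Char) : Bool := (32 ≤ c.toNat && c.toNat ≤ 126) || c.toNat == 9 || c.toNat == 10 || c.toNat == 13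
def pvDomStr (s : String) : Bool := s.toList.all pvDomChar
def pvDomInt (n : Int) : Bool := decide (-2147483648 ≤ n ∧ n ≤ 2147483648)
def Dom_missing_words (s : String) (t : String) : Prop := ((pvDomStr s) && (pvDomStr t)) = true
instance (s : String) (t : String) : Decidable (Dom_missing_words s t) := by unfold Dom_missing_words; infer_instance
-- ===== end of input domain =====

-- File: B replaces A's streaming two-pointer scan by two staged passes — first collect the
-- set of greedily matched s-indices via repeated index-searches over t's tokens, then filter
-- s's tokens by that set (objective: alternative, same cost).

-- ===== PORT A =====
-- A's while over indices i,j: head of the first list is sa[i], head of the second is ta[j];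
-- "j == len(ta)" is the [] case of the second list; termination = i increases every iteration.
def pvLoopA : List String → List String → List String
  | [], _ => []
  | x :: xs, [] => x :: pvLoopA xs []
  | x :: xs, y :: ys => if x ≠ y then x :: pvLoopA xs (y :: ys) else pvLoopA xs ys

def missing_words (s : String) (t : String) : String :=
  PySem.Str.join " " (pvLoopA (PySem.Str.split₀ s) (PySem.Str.split₀ t))

-- ===== PORT B =====
-- Hand port of Python's sa.index(w, start) (ValueError → none); exact for 0 ≤ start, the only
-- way B calls it (start = prev+1 ≥ 0): first index i ≥ start with sa[i] == w, scanning upward.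
def pvIndexFrom (w : String) (st : Int) : List String → Int → Option Int
  | [], _ => none
  | x :: xs, i => if st ≤ i ∧ x = w then some i else pvIndexFrom w st xs (i + 1)

-- the 'for w in ta' loop with its break: state = (prev, matched)
def pvLoopB (sa : List String) : List String → Int → PySem.Set Int → PySem.Set Int
  | [], _, m => m
  | w :: ws, prev, m =>
    match pvIndexFrom w (prev + 1) sa 0 with
    | none => m                                  -- except ValueError: break
    | some k => pvLoopB sa ws k (PySem.Set.add m k)

def missing_words_alt (s : String) (t : String) : String :=
  let sa := PySem.Str.split₀ s
  let ta := PySem.Str.split₀ t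
  let matched := pvLoopB sa ta (-1) PySem.Set.empty
  PySem.Str.join " "
    (((PySem.List.enumerate sa 0).filter
        (fun q => !(PySem.Set.contains matched q.1))).map (fun q => q.2))

-- ===== PRECONDITION & SPEC =====
def Spec_missing_words (s : String) (t : String) (out : String) : Prop := out = missing_words_alt s t
instance (s : String) (t : String) (out : String) : Decidable (Spec_missing_words s t out) := by unfold Spec_missing_words; infer_instance

-- ===== CLAIM (what is proved, stated in full; the proofs are below) =====
def Claim_equal_missing_words : Prop := ∀ (s : String) (t : String), Dom_missing_words s t → Spec_missing_words s t (missing_words s t)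

-- ===== LEMMAS AND PROOFS =====

theorem pvLoopA_nil (sa : List String) : pvLoopA sa [] = sa := by
  induction sa with
  | nil => rfl
  | cons x xs ih => simp [pvLoopA, ih]

-- A's while with a fixed ta-head w copies sa up to the first occurrence of w, then consumes it
theorem pvLoopA_cons (sa : List String) (w : String) (ws : List String) :
    pvLoopA sa (w :: ws) =
      match List.findIdx? (fun x => x == w) sa with
      | none => sa
      | some k => sa.take k ++ pvLoopA (sa.drop (k + 1)) ws := by
  induction sa with
  | nil => rfl
  | cons x xs ih =>
    by_cases h : x = w
    · simp [pvLoopA, h, List.findIdx?_cons]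
    · simp only [pvLoopA, if_pos (by exact h), List.findIdx?_cons,
        show (x == w) = false by simp [h]]
      rw [ih]
      cases hf : List.findIdx? (fun x => x == w) xs <;> simp

theorem pvIndexFrom_shift (w : String) (sa : List String) :
    ∀ (st i : Int), pvIndexFrom w (st + 1) sa (i + 1) = (pvIndexFrom w st sa i).map (· + 1) := by
  induction sa with
  | nil => intro st i; rfl
  | cons x xs ih =>
    intro st i
    by_cases hc : st ≤ i ∧ x = w
    · simp [pvIndexFrom, hc, show st + 1 ≤ i + 1 from by omega]
    · have hc' : ¬ (st + 1 ≤ i + 1 ∧ x = w) := by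
        intro ⟨h1, h2⟩; exact hc ⟨by omega, h2⟩
      simp only [pvIndexFrom, if_neg hc, if_neg hc']
      exact ih st (i + 1)

theorem pvIndexFrom_ge (w : String) (sa : List String) :
    ∀ (st i : Int), st ≤ i →
      pvIndexFrom w st sa i =
        (List.findIdx? (fun x => x == w) sa).map (fun (k : Nat) => i + (k : Int)) := by
  induction sa with
  | nil => intro st i _; rfl
  | cons x xs ih =>
    intro st i hst
    by_cases h : x = w
    · simp [pvIndexFrom, hst, h, List.findIdx?_cons]
    · have hx : (x == w) = false := by simp [h]
      rw [show pvIndexFrom w st (x :: xs) i = pvIndexFrom w st xs (i + 1) from by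
        simp [pvIndexFrom, (show ¬ (st ≤ i ∧ x = w) from fun hc => h hc.2)]]
      rw [ih st (i + 1) (by omega), List.findIdx?_cons, hx]
      cases hf : List.findIdx? (fun x => x == w) xs with
      | none => simp
      | some k =>
        simp only [Option.map_some, Bool.false_eq_true, if_false]
        congr 1
        push_cast; ring

theorem pvIndexFrom_drop (w : String) :
    ∀ (p : Nat) (sa : List String),
      pvIndexFrom w (p : Int) sa 0 =
        (List.findIdx? (fun x => x == w) (sa.drop p)).map (fun (k : Nat) => ((p + k : Nat) : Int)) := by
  intro p
  induction p with
  | zero =>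
    intro sa
    rw [Nat.cast_zero, pvIndexFrom_ge w sa 0 0 (le_refl 0), List.drop_zero]
    cases List.findIdx? (fun x => x == w) sa with
    | none => simp
    | some k => simp
  | succ p ih =>
    intro sa
    cases sa with
    | nil => rfl
    | cons x xs =>
      have hc : ¬ (((p + 1 : Nat) : Int) ≤ 0 ∧ x = w) := by
        rintro ⟨h1, -⟩; omega
      simp only [pvIndexFrom, if_neg hc]
      have hs : pvIndexFrom w ((p + 1 : Nat) : Int) xs 1 = (pvIndexFrom w (p : Int) xs 0).map (· + 1) := by
        have h0 := pvIndexFrom_shift w xs (p : Int) 0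
        have h1 : ((p + 1 : Nat) : Int) = (p : Int) + 1 := by push_cast; ring
        rw [h1]
        simpa using h0
      rw [zero_add, hs, ih xs, List.drop_succ_cons]
      cases hf : List.findIdx? (fun x => x == w) (xs.drop p) with
      | none => simp
      | some k =>
        simp only [Option.map_some]
        congr 1
        push_cast; ring

-- the absolute indices greedily matched by B's loop, computed as a pure list
def pvGIdx : List String → List String → Nat → List Int
  | _, [], _ => []
  | sa, w :: ws, p =>
    match List.findIdx? (fun x => x == w) sa with
    | none => []
    | some k => ((p + k : Nat) : Int) :: pvGIdx (sa.drop (k + 1)) ws (p + k + 1)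

theorem pvGIdx_ge : ∀ (ta sa : List String) (p : Nat), ∀ x ∈ pvGIdx sa ta p, (p : Int) ≤ x := by
  intro ta
  induction ta with
  | nil => intro sa p x hx; simp [pvGIdx] at hx
  | cons w ws ih =>
    intro sa p x hx
    simp only [pvGIdx] at hx
    cases hf : List.findIdx? (fun x => x == w) sa with
    | none => rw [hf] at hx; simp at hx
    | some k =>
      rw [hf] at hx
      rcases List.mem_cons.mp hx with h | h
      · subst h; push_cast; omega
      · have := ih _ _ _ h; push_cast at this ⊢; omega

theorem pvLoopB_eq : ∀ (ta : List String) (p : Nat) (sa : List String) (m : PySem.Set Int),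
    pvLoopB sa ta ((p : Int) - 1) m = PySem.Set.update m (pvGIdx (sa.drop p) ta p) := by
  intro ta
  induction ta with
  | nil => intro p sa m; rfl
  | cons w ws ih =>
    intro p sa m
    have hst : ((p : Int) - 1) + 1 = (p : Int) := by ring
    simp only [pvLoopB, hst, pvIndexFrom_drop, pvGIdx]
    cases hf : List.findIdx? (fun x => x == w) (sa.drop p) with
    | none => simp [PySem.Set.update_nil]
    | some k =>
      simp only [Option.map_some]
      have hk : ((p + k : Nat) : Int) = ((p + k + 1 : Nat) : Int) - 1 := by push_cast; ring
      rw [hk, ih (p + k + 1) sa]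
      rw [show sa.drop (p + k + 1) = (sa.drop p).drop (k + 1) by
        rw [List.drop_drop]; ring_nf]
      rw [PySem.Set.update_cons]

-- splitting the filtered enumeration at one matched index
theorem pvFilter_split (pre : List String) (x : String) (suf : List String) (p : Nat)
    (S' : List Int) (hS' : ∀ y ∈ S', (p : Int) + pre.length + 1 ≤ y) :
    (((PySem.List.enumerate (pre ++ x :: suf) (p : Int)).filter
        (fun q => !(decide (q.1 ∈ ((p : Int) + pre.length) :: S')))).map (fun q => q.2)) =
      pre ++ (((PySem.List.enumerate suf ((p : Int) + pre.length + 1)).filter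
        (fun q => !(decide (q.1 ∈ S')))).map (fun q => q.2)) := by
  rw [PySem.List.enumerate_append, List.filter_append, List.map_append]
  congr 1
  · have hkeep : ∀ q ∈ PySem.List.enumerate pre (p : Int),
        (!(decide (q.1 ∈ ((p : Int) + pre.length) :: S'))) = true := by
      intro q hq
      rcases (PySem.List.mem_enumerate_iff _ _ _).mp hq with ⟨j, hj, rfl⟩
      simp only [Bool.not_eq_true', decide_eq_false_iff_not, List.mem_cons]
      rintro (h | h)
      · omega
      · have := hS' _ h; omega
    rw [List.filter_eq_self.mpr hkeep, PySem.List.map_snd_enumerate]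
  · rw [PySem.List.enumerate_cons, List.filter_cons]
    rw [if_neg (by simp)]
    congr 1
    apply List.filter_congr
    intro q hq
    rcases (PySem.List.mem_enumerate_iff _ _ _).mp hq with ⟨j, hj, rfl⟩
    simp only [List.mem_cons]
    have hne : ¬ ((p : Int) + pre.length + 1 + (j : Int) = (p : Int) + pre.length) := by omega
    by_cases h : ((p : Int) + pre.length + 1 + (j : Int)) ∈ S' <;> simp [h, hne]

theorem pvFilter_loop : ∀ (ta sa : List String) (p : Nat),
    (((PySem.List.enumerate sa (p : Int)).filter
        (fun q => !(decide (q.1 ∈ pvGIdx sa ta p)))).map (fun q => q.2)) = pvLoopA sa ta := by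
  intro ta
  induction ta with
  | nil =>
    intro sa p
    simp [pvGIdx, pvLoopA_nil, PySem.List.map_snd_enumerate]
  | cons w ws ih =>
    intro sa p
    cases hf : List.findIdx? (fun x => x == w) sa with
    | none =>
      simp [pvLoopA_cons, pvGIdx, hf, PySem.List.map_snd_enumerate]
    | some k =>
      simp only [pvLoopA_cons, hf]
      obtain ⟨hk, -, -⟩ := List.findIdx?_eq_some_iff_getElem.mp hf
      have hsa : sa = sa.take k ++ sa[k] :: sa.drop (k + 1) := by
        conv_lhs => rw [← List.take_append_drop k sa]
        rw [List.drop_eq_getElem_cons hk]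
      have hlen : (sa.take k).length = k := by simp [List.length_take, Nat.min_eq_left hk.le]
      have hhead : ((p + k : Nat) : Int) = (p : Int) + ((sa.take k).length : Int) := by
        rw [hlen]; push_cast; ring
      have hS : pvGIdx sa (w :: ws) p =
          ((p : Int) + ((sa.take k).length : Int)) :: pvGIdx (sa.drop (k + 1)) ws (p + k + 1) := by
        simp only [pvGIdx, hf]
        rw [hhead]
      have henum : PySem.List.enumerate sa (p : Int) =
          PySem.List.enumerate (sa.take k ++ sa[k] :: sa.drop (k + 1)) (p : Int) := by
        rw [← hsa]
      rw [hS, henum]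
      rw [pvFilter_split (sa.take k) (sa[k]) (sa.drop (k + 1)) p
            (pvGIdx (sa.drop (k + 1)) ws (p + k + 1)) (by
        intro y hy
        have := pvGIdx_ge ws (sa.drop (k + 1)) (p + k + 1) y hy
        rw [hlen]; push_cast at this ⊢; omega)]
      congr 1
      rw [hlen, show ((p : Int) + (k : Int) + 1) = ((p + k + 1 : Nat) : Int) by push_cast; ring]
      exact ih (sa.drop (k + 1)) (p + k + 1)

-- ===== VERDICT (by name: the statement is the Claim_ definition above) =====
theorem missing_words_spec : Claim_equal_missing_words := by
  intro s t _
  unfold Spec_missing_words missing_words missing_words_alt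
  simp only []
  set sa := PySem.Str.split₀ s with hsa
  set ta := PySem.Str.split₀ t with hta
  have hm : pvLoopB sa ta (-1) PySem.Set.empty =
      PySem.Set.update PySem.Set.empty (pvGIdx sa ta 0) := by
    have := pvLoopB_eq ta 0 sa PySem.Set.empty
    simpa using this
  have hcontains : ∀ q : Int × String,
      (!(PySem.Set.contains (pvLoopB sa ta (-1) PySem.Set.empty) q.1)) =
        (!(decide (q.1 ∈ pvGIdx sa ta 0))) := by
    intro q
    rw [hm]
    by_cases h : q.1 ∈ pvGIdx sa ta 0
    · have : PySem.Set.contains (PySem.Set.update PySem.Set.empty (pvGIdx sa ta 0)) q.1 = true :=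
        (PySem.Set.contains_iff _ _).mpr ((PySem.Set.mem_update _ _ _).mpr (Or.inr h))
      simp [h]
    · have : PySem.Set.contains (PySem.Set.update PySem.Set.empty (pvGIdx sa ta 0)) q.1 ≠ true := by
        intro hc
        rcases (PySem.Set.mem_update _ _ _).mp ((PySem.Set.contains_iff _ _).mp hc) with h' | h'
        · simp [PySem.Set.empty] at h'
        · exact h h'
      simp [h]
  rw [List.filter_congr (fun q _ => hcontains q)]
  congr 1
  have := pvFilter_loop ta sa 0
  simpa using this.symm
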